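-- pv_equiv track=rewrite | github.com/mlmerchant/smk-mirror-track | mirror-smkc.py | reverse_full_map
-- ===== SOURCE A (Python) =====
-- def reverse_full_map(map_lines):
--     if len(map_lines) % 4 != 0:
--         raise ValueError("MAP section not aligned to 4-line rows")
--
--     reversed_lines = []
--     for i in range(0, len(map_lines), 4):
--         # Each group of 4 lines = one 128-tile row (each line is 32 tiles = 64 hex chars)
--         row_tiles = []
--         for line in map_lines[i:i+4]:
--             row_tiles.extend([line[j:j+2] for j in range(0, 64, 2)])
--
--         assert len(row_tiles) == 128
--
--         # Mirror the row
--         row_tiles.reverse()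
--
--         # Re-split into 4 lines of 32 tiles (64 hex chars)
--         for j in range(0, 128, 32):
--             reversed_line = "#" + ''.join(row_tiles[j:j+32]) + "\n"
--             reversed_lines.append(reversed_line)
--
--     return reversed_lines
-- ===== SOURCE B (Python) =====
-- def reverse_full_map(map_lines):
--     if len(map_lines) % 4 != 0:
--         raise ValueError("MAP section not aligned to 4-line rows")
--
--     out = []
--     for i in range(0, len(map_lines), 4):
--         # Mirroring the 128-tile row == reversing the line order within the
--         # group and each line's 32-tile sequence; no flat 128-list is built.
--         for line in reversed(map_lines[i:i+4]):
--             tiles = [line[j:j+2] for j in range(0, 64, 2)]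
--             tiles.reverse()
--             out.append("#" + "".join(tiles) + "\n")
--     return out
-- ===== Notes on version B (the rewrite author's own statement) =====
-- stated objective: simpler
-- what changed: Instead of flattening each 4-line group into a 128-tile list, reversing it and re-splitting into 4 lines, B iterates the group's lines in reversed order and reverses each line's 32-tile list in place, never building the flat 128-tile row.
import Mathlib
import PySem

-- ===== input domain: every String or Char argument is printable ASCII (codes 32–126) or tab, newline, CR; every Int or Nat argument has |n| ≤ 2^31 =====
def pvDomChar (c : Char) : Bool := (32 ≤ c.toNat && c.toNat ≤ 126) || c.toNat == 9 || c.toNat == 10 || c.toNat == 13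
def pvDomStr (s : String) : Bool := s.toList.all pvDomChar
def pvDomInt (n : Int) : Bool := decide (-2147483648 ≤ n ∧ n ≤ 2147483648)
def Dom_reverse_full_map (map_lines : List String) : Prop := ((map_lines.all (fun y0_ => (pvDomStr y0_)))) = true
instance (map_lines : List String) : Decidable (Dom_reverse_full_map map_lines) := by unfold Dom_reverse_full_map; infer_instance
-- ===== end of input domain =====

-- B replaces A's flatten-128-tiles / reverse / re-split decomposition by a per-line one
-- (reversed line order within each group, each line's 32-tile list reversed); objective: simpler.


-- ===== PORT A =====
-- `[line[j:j+2] for j in range(0, 64, 2)]` (tiles are strings; represented as List Char)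
def pvTiles (line : String) : List (List Char) :=
  (PySem.List.pyRange 0 64 2).map (fun j => PySem.List.slice line.toList (some j) (some (j + 2)))

def reverse_full_map (map_lines : List String) : List String :=
  (PySem.List.pyRange 0 (map_lines.length : Int) 4).foldl (fun reversed_lines i =>
    -- row_tiles: extend with each line's 32 tiles
    let row_tiles := (PySem.List.slice map_lines (some i) (some (i + 4))).foldl
      (fun acc line => acc ++ pvTiles line) []
    -- mirror the row
    let row_tiles := row_tiles.reverse
    -- re-split into 4 lines of 32 tiles
    (PySem.List.pyRange 0 128 32).foldl (fun acc j =>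
      acc ++ [String.ofList ('#' ::
        PySem.Chars.join [] (PySem.List.slice row_tiles (some j) (some (j + 32))) ++ ['\n'])])
      reversed_lines)
    []

-- ===== PORT B =====
def reverse_full_map_alt (map_lines : List String) : List String :=
  (PySem.List.pyRange 0 (map_lines.length : Int) 4).foldl (fun out i =>
    (PySem.List.slice map_lines (some i) (some (i + 4))).reverse.foldl (fun out line =>
      let tiles := (PySem.List.pyRange 0 64 2).map
        (fun j => PySem.List.slice line.toList (some j) (some (j + 2)))
      out ++ [String.ofList ('#' :: PySem.Chars.join [] tiles.reverse ++ ['\n'])])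
      out)
    []

-- ===== PRECONDITION & SPEC =====
-- Pre_ excludes exactly the inputs where A raises ValueError: a line count not a multiple of 4.
def Pre_reverse_full_map (map_lines : List String) : Prop := map_lines.length % 4 = 0
instance (map_lines : List String) : Decidable (Pre_reverse_full_map map_lines) := by
  unfold Pre_reverse_full_map; infer_instance

def pvWitness_reverse_full_map : List String :=
  ["00112233", "445566", "", "aabbccdd"]

def Spec_reverse_full_map (map_lines : List String) (out : List String) : Prop := out = reverse_full_map_alt map_lines
instance (map_lines : List String) (out : List String) : Decidable (Spec_reverse_full_map map_lines out) := by unfold Spec_reverse_full_map; infer_instance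

-- ===== CLAIM (what is proved, stated in full; the proofs are below) =====
def Claim_equal_reverse_full_map : Prop := ∀ (map_lines : List String), Dom_reverse_full_map map_lines → Pre_reverse_full_map map_lines → Spec_reverse_full_map map_lines (reverse_full_map map_lines)

-- ===== LEMMAS AND PROOFS =====

lemma pv_range128 : PySem.List.pyRange 0 128 32 = [0, 32, 64, 96] := by decide

lemma pv_tiles_len (l : String) : (pvTiles l).reverse.length = 32 := by
  simp only [List.length_reverse, pvTiles, List.length_map]; decide

theorem pv_main (ml : List String) (hpre : ml.length % 4 = 0) :
    reverse_full_map ml = reverse_full_map_alt ml := by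
  unfold reverse_full_map reverse_full_map_alt
  refine PySem.List.foldl_congr_mem _ _ _ _ ?_
  intro acc i hi
  -- with 4 ∣ length, each visited group map_lines[i:i+4] has exactly 4 lines
  obtain ⟨a, b, c, d, hg⟩ : ∃ a b c d,
      PySem.List.slice ml (some i) (some (i + 4)) = [a, b, c, d] := by
    rw [PySem.List.mem_pyRange_iff_of_pos (by norm_num)] at hi
    obtain ⟨h0, hlt, hdvd⟩ := hi
    have hlen : (PySem.List.slice ml (some i) (some (i + 4))).length = 4 := by
      rw [PySem.List.slice_toNat _ h0 (by omega)]
      simp only [List.length_take, List.length_drop]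
      omega
    match h : PySem.List.slice ml (some i) (some (i + 4)), hlen with
    | [a, b, c, d], _ => exact ⟨a, b, c, d, rfl⟩
  rw [hg]
  simp only [List.foldl_cons, List.foldl_nil, List.nil_append, List.reverse_cons,
    List.reverse_nil, List.reverse_append, pv_range128, List.cons_append]
  -- the four 32-tile slices of the reversed 128-tile row are the per-line reversed tile lists
  have t0 : PySem.List.slice
      ((pvTiles d).reverse ++ ((pvTiles c).reverse ++ ((pvTiles b).reverse ++ (pvTiles a).reverse)))
      (some 0) (some (0 + 32)) = (pvTiles d).reverse := by
    simp [pysem, List.take_left' (pv_tiles_len d)]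
  have t1 : PySem.List.slice
      ((pvTiles d).reverse ++ ((pvTiles c).reverse ++ ((pvTiles b).reverse ++ (pvTiles a).reverse)))
      (some 32) (some (32 + 32)) = (pvTiles c).reverse := by
    simp [pysem, List.drop_left' (pv_tiles_len d), List.take_left' (pv_tiles_len c)]
  have t2 : PySem.List.slice
      ((pvTiles d).reverse ++ ((pvTiles c).reverse ++ ((pvTiles b).reverse ++ (pvTiles a).reverse)))
      (some 64) (some (64 + 32)) = (pvTiles b).reverse := by
    simp [pysem]
    rw [show (64 : Nat) = 32 + 32 from rfl, ← List.drop_drop,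
      List.drop_left' (pv_tiles_len d), List.drop_left' (pv_tiles_len c),
      List.take_left' (pv_tiles_len b)]
  have t3 : PySem.List.slice
      ((pvTiles d).reverse ++ ((pvTiles c).reverse ++ ((pvTiles b).reverse ++ (pvTiles a).reverse)))
      (some 96) (some (96 + 32)) = (pvTiles a).reverse := by
    simp [pysem]
    rw [show (96 : Nat) = (32 + 32) + 32 from rfl, ← List.drop_drop, ← List.drop_drop,
      List.drop_left' (pv_tiles_len d), List.drop_left' (pv_tiles_len c),
      List.drop_left' (pv_tiles_len b),
      List.take_of_length_le (le_of_eq (pv_tiles_len a))]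
  rw [t0, t1, t2, t3]
  simp [pvTiles]

-- ===== VERDICT (by name: the statement is the Claim_ definition above) =====
theorem reverse_full_map_spec : Claim_equal_reverse_full_map := by
  intro map_lines _ hpre
  unfold Spec_reverse_full_map
  exact pv_main map_lines hpre
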